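-- pv_equiv track=rewrite | github.com/gahjelle/everybody_codes | python/src/2024_the-kingdom-of-algorithmia/11_biological-warfare/ec202411.py | grow_population
-- ===== SOURCE A (Python) =====
-- def grow_population(
--     conversions: dict[str, dict[str, int]], population: dict[str, int]
-- ) -> dict[str, int]:
--     """Grow the population one day
--
--     ## Example
--
--     >>> conversions = {"B": {"A": 1}, "C": {"A": 1, "B": 1}, "A": {"B": 1, "C": 1}}
--     >>> grow_population(conversions, {"B":1, "C": 1})
--     {'B': 0, 'C': 1, 'A': 2}
--     """
--     return {
--         termite: sum(
--             population.get(parent, 0) * count for parent, count in parents.items()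
--         )
--         for termite, parents in conversions.items()
--     }
-- ===== SOURCE B (Python) =====
-- def grow_population(conversions, population):
--     """Grow the population one day (transposed scatter instead of per-termite sums)."""
--     consumers = {}
--     for termite, parents in conversions.items():
--         for parent, count in parents.items():
--             consumers.setdefault(parent, []).append((termite, count))
--     result = {termite: 0 for termite in conversions}
--     for parent, value in population.items():
--         for termite, count in consumers.get(parent, []):
--             result[termite] += value * count
--     return result
-- ===== Notes on version B (the rewrite author's own statement) =====
-- stated objective: alternative
-- what changed: B inverts the traversal: instead of summing over each termite's parents with dict lookups, it builds a transposed 'consumers' index once and scatters each population entry's contribution into a zero-initialised result dict.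
import Mathlib
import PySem

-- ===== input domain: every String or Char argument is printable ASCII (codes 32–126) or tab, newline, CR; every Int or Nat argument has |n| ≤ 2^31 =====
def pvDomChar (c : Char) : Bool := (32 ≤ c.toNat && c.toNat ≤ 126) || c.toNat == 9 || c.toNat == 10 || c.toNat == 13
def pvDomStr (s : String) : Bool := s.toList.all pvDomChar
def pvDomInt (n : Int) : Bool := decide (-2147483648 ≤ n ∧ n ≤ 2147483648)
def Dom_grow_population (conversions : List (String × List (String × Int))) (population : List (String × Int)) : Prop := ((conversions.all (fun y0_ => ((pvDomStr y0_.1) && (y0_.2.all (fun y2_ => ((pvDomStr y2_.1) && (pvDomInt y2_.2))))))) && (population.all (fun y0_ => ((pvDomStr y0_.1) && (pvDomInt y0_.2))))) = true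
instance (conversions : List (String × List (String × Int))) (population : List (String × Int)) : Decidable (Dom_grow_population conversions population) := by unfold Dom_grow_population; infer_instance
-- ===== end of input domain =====

-- B replaces A's per-termite summation (one dict lookup per parent entry) by a transposed
-- 'consumers' index built once and a scatter pass over the population (objective: alternative
-- decomposition, same asymptotic cost). Neither version mutates its arguments.

-- ===== PORT A =====
-- dict comprehension over conversions.items(); sum(...) over parents.items() with population.get(parent, 0)
def grow_population (conversions : List (String × List (String × Int))) (population : List (String × Int)) : List (String × Int) :=
  (conversions.foldl
    (fun (d : PySem.Dict String Int) tp =>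
      d.insert tp.1 ((tp.2.map (fun pc => (PySem.Dict.mk population).getD pc.1 0 * pc.2)).sum))
    PySem.Dict.empty).items

-- ===== PORT B =====
-- consumers: parent -> list of (termite, count); result: zero-initialised from conversions, then
-- each population entry scatters value*count onto result[termite] (termite is always a key of result).
def grow_population_alt (conversions : List (String × List (String × Int))) (population : List (String × Int)) : List (String × Int) :=
  let consumers : PySem.Dict String (List (String × Int)) :=
    conversions.foldl
      (fun d tp => tp.2.foldl (fun d pc => d.modify pc.1 [] (fun l => l ++ [(tp.1, pc.2)])) d)
      PySem.Dict.empty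
  let result0 : PySem.Dict String Int :=
    conversions.foldl (fun d tp => d.insert tp.1 0) PySem.Dict.empty
  let result : PySem.Dict String Int :=
    population.foldl
      (fun d pv => (consumers.getD pv.1 []).foldl
        (fun d tc => d.modify tc.1 0 (fun x => x + pv.2 * tc.2)) d)
      result0
  result.items

-- ===== PRECONDITION & SPEC =====
-- Pre_ requires distinct keys in both association lists: the Python arguments are dicts, whose key
-- lists are always distinct, so Pre_ excludes no Python-representable input; on duplicate-key lists
-- A's first-match lookup and B's full scatter are both accidental.
def Pre_grow_population (conversions : List (String × List (String × Int))) (population : List (String × Int)) : Prop :=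
  (conversions.map Prod.fst).Nodup ∧ (population.map Prod.fst).Nodup
instance (conversions : List (String × List (String × Int))) (population : List (String × Int)) : Decidable (Pre_grow_population conversions population) := by unfold Pre_grow_population; infer_instance

def pvWitness_grow_population : (List (String × List (String × Int))) × (List (String × Int)) :=
  ([("B", [("A", 1)]), ("C", [("A", 1), ("B", 1)]), ("A", [("B", 1), ("C", 1)])], [("B", 1), ("C", 1)])

def Spec_grow_population (conversions : List (String × List (String × Int))) (population : List (String × Int)) (out : List (String × Int)) : Prop := out = grow_population_alt conversions population
instance (conversions : List (String × List (String × Int))) (population : List (String × Int)) (out : List (String × Int)) : Decidable (Spec_grow_population conversions population out) := by unfold Spec_grow_population; infer_instance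

-- ===== CLAIM (what is proved, stated in full; the proofs are below) =====
def Claim_equal_grow_population : Prop := ∀ (conversions : List (String × List (String × Int))) (population : List (String × Int)), Dom_grow_population conversions population → Pre_grow_population conversions population → Spec_grow_population conversions population (grow_population conversions population)

-- ===== LEMMAS AND PROOFS =====

-- all (parent, (termite, count)) triples of conversions, in traversal order
def pvPairs (conversions : List (String × List (String × Int))) : List (String × (String × Int)) :=
  conversions.flatMap (fun tp => tp.2.map (fun pc => (pc.1, (tp.1, pc.2))))

-- B's transposed index (the first loop of B)
def pvConsumers (conversions : List (String × List (String × Int))) : PySem.Dict String (List (String × Int)) :=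
  conversions.foldl
    (fun d tp => tp.2.foldl (fun d pc => d.modify pc.1 [] (fun l => l ++ [(tp.1, pc.2)])) d)
    PySem.Dict.empty

-- B's zero-initialised result dict
def pvResult0 (conversions : List (String × List (String × Int))) : PySem.Dict String Int :=
  conversions.foldl (fun d tp => d.insert tp.1 0) PySem.Dict.empty

-- sum of the counts attached to termite t in a consumers list
def pvFSum (t : String) (L : List (String × Int)) : Int :=
  ((L.filter (fun tc => tc.1 == t)).map (·.2)).sum

theorem pvConsumers_eq_foldl_pairs (conversions : List (String × List (String × Int))) :
    pvConsumers conversions =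
      (pvPairs conversions).foldl (fun d p => d.modify p.1 [] (fun l => l ++ [p.2])) PySem.Dict.empty := by
  unfold pvConsumers pvPairs
  rw [List.foldl_flatMap]
  simp only [List.foldl_map]

theorem pvConsumers_getD (conversions : List (String × List (String × Int))) (p : String) :
    (pvConsumers conversions).getD p [] =
      ((pvPairs conversions).filter (fun q => q.1 == p)).map (·.2) := by
  rw [pvConsumers_eq_foldl_pairs, PySem.Dict.getD_foldl_modify_append]
  simp [PySem.Dict.getD_empty]

theorem pvFSum_cons (t : String) (tc : String × Int) (L : List (String × Int)) :
    pvFSum t (tc :: L) = (if tc.1 == t then tc.2 else 0) + pvFSum t L := by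
  by_cases h : tc.1 == t <;> simp [pvFSum, h]

theorem pvInner_getD (L : List (String × Int)) (v : Int) (d : PySem.Dict String Int) (t : String) :
    (L.foldl (fun d tc => d.modify tc.1 0 (fun x => x + v * tc.2)) d).getD t 0
      = d.getD t 0 + v * pvFSum t L := by
  induction L generalizing d with
  | nil => simp [pvFSum]
  | cons tc L ih =>
    simp only [List.foldl_cons, ih, pvFSum_cons, PySem.Dict.getD_modify]
    by_cases h : t = tc.1
    · simp [h]; ring
    · have h2 : (tc.1 == t) = false := by simp [Ne.symm h]
      simp [h, h2]

theorem pvScatter_getD (pop : List (String × Int)) (C : PySem.Dict String (List (String × Int)))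
    (d : PySem.Dict String Int) (t : String) :
    (pop.foldl (fun d pv => (C.getD pv.1 []).foldl
        (fun d tc => d.modify tc.1 0 (fun x => x + pv.2 * tc.2)) d) d).getD t 0
      = d.getD t 0 + (pop.map (fun pv => pv.2 * pvFSum t (C.getD pv.1 []))).sum := by
  induction pop generalizing d with
  | nil => simp
  | cons pv pop ih =>
    simp only [List.foldl_cons, ih, pvInner_getD, List.map_cons, List.sum_cons]
    ring

theorem pvResult0_items (conversions : List (String × List (String × Int)))
    (h : (conversions.map Prod.fst).Nodup) :
    (pvResult0 conversions).items = conversions.map (fun tp => (tp.1, (0 : Int))) := by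
  unfold pvResult0
  rw [PySem.Dict.items_foldl_insert_fresh conversions (fun tp => tp.1) (fun _ => (0:Int))
      PySem.Dict.empty (by simp [PySem.Dict.contains_empty]) h]
  rfl

theorem pvResult0_keys (conversions : List (String × List (String × Int)))
    (h : (conversions.map Prod.fst).Nodup) :
    (pvResult0 conversions).keys = conversions.map Prod.fst := by
  simp only [PySem.Dict.keys, pvResult0_items conversions h, List.map_map]
  rfl

theorem pvSet_update_self (s l : List String) (h : ∀ x ∈ l, x ∈ s) :
    PySem.Set.update s l = s := by
  rw [PySem.Set.update_eq_append_filter]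
  have hnil : (PySem.Set.ofList l).filter (fun y => !(PySem.Set.contains s y)) = [] := by
    rw [List.filter_eq_nil_iff]
    intro y hy
    simp
    exact h y ((PySem.Set.mem_ofList l y).mp hy)
  rw [hnil, List.append_nil]

theorem pvScatter_keys (pop : List (String × Int)) (C : PySem.Dict String (List (String × Int)))
    (d : PySem.Dict String Int)
    (h : ∀ p : String, ∀ tc ∈ C.getD p [], tc.1 ∈ d.keys) :
    (pop.foldl (fun d pv => (C.getD pv.1 []).foldl
        (fun d tc => d.modify tc.1 0 (fun x => x + pv.2 * tc.2)) d) d).keys = d.keys := by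
  induction pop generalizing d with
  | nil => rfl
  | cons pv pop ih =>
    simp only [List.foldl_cons]
    have hk : ((C.getD pv.1 []).foldl (fun d tc => d.modify tc.1 0 (fun x => x + pv.2 * tc.2)) d).keys = d.keys := by
      rw [PySem.Dict.keys_foldl_modify_key (C.getD pv.1 []) (fun tc => tc.1) 0
            (fun _ tc x => x + pv.2 * tc.2) d]
      refine pvSet_update_self _ _ ?_
      intro x hx
      simp only [List.mem_map] at hx
      obtain ⟨tc, htc, rfl⟩ := hx
      exact h pv.1 tc htc
    rw [ih _ (by intro p tc htc; rw [hk]; exact h p tc htc), hk]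

theorem pvDictMk_getD (population : List (String × Int)) (q : String)
    (h : (population.map Prod.fst).Nodup) :
    (PySem.Dict.mk population).getD q 0
      = ((population.filter (fun pv => pv.1 == q)).map (·.2)).sum := by
  induction population with
  | nil => simp [PySem.Dict.getD_eq_get?_getD, PySem.Dict.get?]
  | cons pv rest ih =>
    simp only [List.map_cons, List.nodup_cons] at h
    by_cases hq : pv.1 = q
    · have hrest : rest.filter (fun pv' => pv'.1 == q) = [] := by
        rw [List.filter_eq_nil_iff]
        intro x hx
        simp only [beq_iff_eq]
        intro hxq
        exact h.1 (by rw [hq, ← hxq]; exact List.mem_map_of_mem hx)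
      rw [PySem.Dict.getD_eq_get?_getD, PySem.Dict.get?_mk_cons]
      simp [hq, hrest]
    · rw [PySem.Dict.getD_eq_get?_getD, PySem.Dict.get?_mk_cons]
      have hb : (pv.1 == q) = false := by simp [hq]
      simp only [hb, Bool.false_eq_true, if_false, List.filter_cons]
      rw [← PySem.Dict.getD_eq_get?_getD]
      exact ih h.2

theorem pvPairs_snd_fst_mem (conversions : List (String × List (String × Int)))
    (q : String × (String × Int)) (hq : q ∈ pvPairs conversions) :
    q.2.1 ∈ conversions.map Prod.fst := by
  simp only [pvPairs, List.mem_flatMap, List.mem_map] at hq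
  obtain ⟨tp, htp, pc, hpc, rfl⟩ := hq
  exact List.mem_map_of_mem htp

theorem pvPairs_filter_termite (conversions : List (String × List (String × Int)))
    (h : (conversions.map Prod.fst).Nodup) (tp : String × List (String × Int)) (htp : tp ∈ conversions) :
    (pvPairs conversions).filter (fun q => q.2.1 == tp.1)
      = tp.2.map (fun pc => (pc.1, (tp.1, pc.2))) := by
  induction conversions with
  | nil => cases htp
  | cons c rest ih =>
    simp only [List.map_cons, List.nodup_cons] at h
    have hsplit : pvPairs (c :: rest) = c.2.map (fun pc => (pc.1, (c.1, pc.2))) ++ pvPairs rest := by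
      simp [pvPairs]
    rw [hsplit, List.filter_append]
    rcases List.mem_cons.mp htp with rfl | hmem
    · have h1 : (tp.2.map (fun pc => (pc.1, (tp.1, pc.2)))).filter (fun q => q.2.1 == tp.1)
          = tp.2.map (fun pc => (pc.1, (tp.1, pc.2))) := by
        rw [List.filter_eq_self]
        intro q hq
        simp only [List.mem_map] at hq
        obtain ⟨pc, _, rfl⟩ := hq
        simp
      have h2 : (pvPairs rest).filter (fun q => q.2.1 == tp.1) = [] := by
        rw [List.filter_eq_nil_iff]
        intro q hq
        simp only [beq_iff_eq]
        intro hc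
        exact h.1 (hc ▸ pvPairs_snd_fst_mem rest q hq)
      rw [h1, h2, List.append_nil]
    · have hne : c.1 ≠ tp.1 := by
        intro he
        exact h.1 (he ▸ List.mem_map_of_mem hmem)
      have h1 : (c.2.map (fun pc => (pc.1, (c.1, pc.2)))).filter (fun q => q.2.1 == tp.1) = [] := by
        rw [List.filter_eq_nil_iff]
        intro q hq
        simp only [List.mem_map] at hq
        obtain ⟨pc, _, rfl⟩ := hq
        simp [hne]
      rw [h1, List.nil_append]
      exact ih h.2 hmem

theorem pvSum_ite (Y : List (String × Int)) (c1 : String) (c : Int) :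
    (Y.map (fun y => if c1 == y.1 then c * y.2 else 0)).sum
      = c * ((Y.filter (fun y => y.1 == c1)).map (·.2)).sum := by
  induction Y with
  | nil => simp
  | cons y Y ih =>
    simp only [List.map_cons, List.sum_cons, List.filter_cons]
    by_cases hy : y.1 = c1
    · have e1 : (c1 == y.1) = true := by simp [hy]
      have e2 : (y.1 == c1) = true := by simp [hy]
      simp only [e1, if_true, e2, List.map_cons, List.sum_cons, ih]
      ring
    · have e1 : (c1 == y.1) = false := by simp [Ne.symm hy]
      have e2 : (y.1 == c1) = false := by simp [hy]
      simp only [e1, Bool.false_eq_true, if_false, e2, ih]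
      ring

theorem pvExchange (X Y : List (String × Int)) :
    (X.map (fun x => x.2 * ((Y.filter (fun y => y.1 == x.1)).map (·.2)).sum)).sum
      = (Y.map (fun y => ((X.filter (fun x => x.1 == y.1)).map (·.2)).sum * y.2)).sum := by
  induction X with
  | nil => simp
  | cons x X ih =>
    simp only [List.map_cons, List.sum_cons, ih]
    have hsplit : ∀ y : String × Int,
        (((x :: X).filter (fun x' => x'.1 == y.1)).map (·.2)).sum * y.2
          = (if x.1 == y.1 then x.2 * y.2 else 0)
            + ((X.filter (fun x' => x'.1 == y.1)).map (·.2)).sum * y.2 := by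
      intro y
      by_cases hx : x.1 = y.1
      · simp [hx, add_mul]
      · simp [hx]
    calc x.2 * ((Y.filter (fun y => y.1 == x.1)).map (·.2)).sum
          + (Y.map (fun y => ((X.filter (fun x' => x'.1 == y.1)).map (·.2)).sum * y.2)).sum
        = (Y.map (fun y => if x.1 == y.1 then x.2 * y.2 else 0)).sum
          + (Y.map (fun y => ((X.filter (fun x' => x'.1 == y.1)).map (·.2)).sum * y.2)).sum := by
          rw [pvSum_ite]
      _ = (Y.map (fun y => (if x.1 == y.1 then x.2 * y.2 else 0)
            + ((X.filter (fun x' => x'.1 == y.1)).map (·.2)).sum * y.2)).sum := by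
          rw [PySem.List.sum_map_add_int]
      _ = (Y.map (fun y => (((x :: X).filter (fun x' => x'.1 == y.1)).map (·.2)).sum * y.2)).sum := by
          exact congrArg List.sum (List.map_congr_left (fun y _ => (hsplit y).symm))

-- B, written with the proof-side names (definitional)
theorem pvAlt_eq (conversions : List (String × List (String × Int))) (population : List (String × Int)) :
    grow_population_alt conversions population
      = (population.foldl
          (fun d pv => ((pvConsumers conversions).getD pv.1 []).foldl
            (fun d tc => d.modify tc.1 0 (fun x => x + pv.2 * tc.2)) d)
          (pvResult0 conversions)).items := rfl

-- the value B's scatter leaves at conversion key tp.1 equals A's per-termite sum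
theorem pvPerKey (conversions : List (String × List (String × Int))) (population : List (String × Int))
    (hc : (conversions.map Prod.fst).Nodup) (hp : (population.map Prod.fst).Nodup)
    (tp : String × List (String × Int)) (htp : tp ∈ conversions) :
    (population.map (fun pv => pv.2 * pvFSum tp.1 ((pvConsumers conversions).getD pv.1 []))).sum
      = (tp.2.map (fun pc => (PySem.Dict.mk population).getD pc.1 0 * pc.2)).sum := by
  have hfs : ∀ pv : String × Int,
      pvFSum tp.1 ((pvConsumers conversions).getD pv.1 [])
        = ((tp.2.filter (fun pc => pc.1 == pv.1)).map (·.2)).sum := by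
    intro pv
    rw [pvConsumers_getD]
    unfold pvFSum
    rw [List.filter_map, List.map_map]
    have hcomp : ((pvPairs conversions).filter (fun q => q.1 == pv.1)).filter
          ((fun tc => tc.1 == tp.1) ∘ (·.2))
        = ((pvPairs conversions).filter (fun q => q.2.1 == tp.1)).filter (fun q => q.1 == pv.1) := by
      rw [List.filter_comm]
      rfl
    rw [hcomp, pvPairs_filter_termite conversions hc tp htp, List.filter_map, List.map_map]
    rfl
  calc (population.map (fun pv => pv.2 * pvFSum tp.1 ((pvConsumers conversions).getD pv.1 []))).sum
      = (population.map (fun pv => pv.2 * ((tp.2.filter (fun pc => pc.1 == pv.1)).map (·.2)).sum)).sum := by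
        exact congrArg List.sum (List.map_congr_left (fun pv _ => by rw [hfs pv]))
    _ = (tp.2.map (fun pc => ((population.filter (fun pv => pv.1 == pc.1)).map (·.2)).sum * pc.2)).sum := by
        exact pvExchange population tp.2
    _ = (tp.2.map (fun pc => (PySem.Dict.mk population).getD pc.1 0 * pc.2)).sum := by
        exact congrArg List.sum (List.map_congr_left (fun pc _ => by rw [pvDictMk_getD population pc.1 hp]))

-- ===== VERDICT (by name: the statement is the Claim_ definition above) =====
theorem grow_population_spec : Claim_equal_grow_population := by
  intro conversions population _ hpre
  obtain ⟨hc, hp⟩ := hpre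
  show grow_population conversions population = grow_population_alt conversions population
  -- A's items
  have hA : grow_population conversions population
      = conversions.map (fun tp =>
          (tp.1, (tp.2.map (fun pc => (PySem.Dict.mk population).getD pc.1 0 * pc.2)).sum)) := by
    unfold grow_population
    rw [PySem.Dict.items_foldl_insert_fresh conversions (fun tp => tp.1)
        (fun tp => (tp.2.map (fun pc => (PySem.Dict.mk population).getD pc.1 0 * pc.2)).sum)
        PySem.Dict.empty (by simp [PySem.Dict.contains_empty]) hc]
    rfl
  -- the scatter result dict of B
  set F : PySem.Dict String Int :=
    population.foldl
      (fun d pv => ((pvConsumers conversions).getD pv.1 []).foldl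
        (fun d tc => d.modify tc.1 0 (fun x => x + pv.2 * tc.2)) d)
      (pvResult0 conversions) with hFdef
  have hsub : ∀ p : String, ∀ tc ∈ (pvConsumers conversions).getD p [], tc.1 ∈ (pvResult0 conversions).keys := by
    intro p tc htc
    rw [pvConsumers_getD] at htc
    simp only [List.mem_map, List.mem_filter] at htc
    obtain ⟨q, ⟨hq, _⟩, rfl⟩ := htc
    rw [pvResult0_keys conversions hc]
    exact pvPairs_snd_fst_mem conversions q hq
  have hFkeys : F.keys = conversions.map Prod.fst := by
    rw [hFdef, pvScatter_keys population (pvConsumers conversions) (pvResult0 conversions) hsub,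
        pvResult0_keys conversions hc]
  have hFnodup : F.keys.Nodup := by rw [hFkeys]; exact hc
  have hB : grow_population_alt conversions population
      = (conversions.map Prod.fst).map (fun t => (t, F.getD t 0)) := by
    rw [pvAlt_eq, ← hFdef, PySem.Dict.items_eq_map_keys F hFnodup 0, hFkeys]
  rw [hA, hB, List.map_map]
  refine List.map_congr_left ?_
  intro tp htp
  have h0 : (pvResult0 conversions).getD tp.1 0 = 0 := by
    have hmem : (tp.1, (0 : Int)) ∈ (pvResult0 conversions).items := by
      rw [pvResult0_items conversions hc]
      exact List.mem_map_of_mem htp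
    have hnd : (pvResult0 conversions).keys.Nodup := by
      rw [pvResult0_keys conversions hc]; exact hc
    exact PySem.Dict.getD_of_mem_items _ hmem hnd 0
  have hval : F.getD tp.1 0
      = (tp.2.map (fun pc => (PySem.Dict.mk population).getD pc.1 0 * pc.2)).sum := by
    rw [hFdef, pvScatter_getD, h0, zero_add]
    exact pvPerKey conversions population hc hp tp htp
  simp [Function.comp, hval]
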